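-- pv_equiv track=rewrite | github.com/thaysrb/curso_python_mit | SET2/p2_3.py | ndoors
-- ===== SOURCE A (Python) =====
-- def ndoors(numero):
--     portas = []
--     open_doors = []
--
--     for i in range(0, numero):
--         portas.append(False)
--
--     for m in range(1, numero + 1):
--         for k in range(0, numero):
--             if (k + 1) % m == 0:
--                 if (portas[k]) == False:
--                     portas[k] = True
--                 else:
--                     portas[k] = False
--
--     for k in range(0, numero):
--         if portas[k] == True:
--             open_doors.append(k + 1)
--
--     return open_doors
-- ===== SOURCE B (Python) =====
-- def ndoors(numero):
--     # A door ends open iff its number has an odd number of divisors,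
--     # i.e. iff it is a perfect square: emit i*i while i*i <= numero.
--     open_doors = []
--     i = 1
--     while i * i <= numero:
--         open_doors.append(i * i)
--         i += 1
--     return open_doors
-- ===== Notes on version B (the rewrite author's own statement) =====
-- stated objective: faster
-- what changed: Replaces the O(n^2) simulate-all-toggles pass with a direct sqrt-bounded loop emitting the perfect squares <= n (a door stays open iff its number has an odd divisor count, i.e. is a square).
import Mathlib
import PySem

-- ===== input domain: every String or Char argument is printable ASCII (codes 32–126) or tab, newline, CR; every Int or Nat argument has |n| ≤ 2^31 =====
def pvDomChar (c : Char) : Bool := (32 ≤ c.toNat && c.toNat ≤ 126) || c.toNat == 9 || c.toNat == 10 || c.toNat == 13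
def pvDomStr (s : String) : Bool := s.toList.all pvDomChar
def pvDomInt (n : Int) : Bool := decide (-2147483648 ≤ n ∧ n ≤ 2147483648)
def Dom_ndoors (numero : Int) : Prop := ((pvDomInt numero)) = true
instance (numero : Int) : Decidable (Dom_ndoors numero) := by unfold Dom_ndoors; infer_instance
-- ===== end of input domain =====

-- B replaces A's O(n^2) toggle simulation by directly emitting the perfect squares ≤ n (objective: faster).

-- ===== PORT A =====
def ndoors (numero : Int) : List Int :=
  let portas : List Bool :=
    (PySem.List.pyRange 0 numero 1).foldl (fun p _ => p ++ [false]) []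
  let portas :=
    (PySem.List.pyRange 1 (numero + 1) 1).foldl (fun p m =>
      (PySem.List.pyRange 0 numero 1).foldl (fun q k =>
        if PySem.Int.mod (k + 1) m == 0 then
          (if PySem.List.pyGetD q k false == false then PySem.List.pySetD q k true
           else PySem.List.pySetD q k false)
        else q) p) portas
  (PySem.List.pyRange 0 numero 1).foldl (fun od k =>
    if PySem.List.pyGetD portas k false == true then od ++ [k + 1] else od) []

-- ===== PORT B =====
theorem ndoorsLoop_meas {numero i : Int} (h : i * i ≤ numero) :
    (numero + 1 - (i + 1)).toNat < (numero + 1 - i).toNat := by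
  have hii : i ≤ i * i := by nlinarith [mul_self_nonneg (i - 1)]
  omega

def ndoorsLoop (numero i : Int) (acc : List Int) : List Int :=
  if h : i * i ≤ numero then ndoorsLoop numero (i + 1) (acc ++ [i * i]) else acc
termination_by (numero + 1 - i).toNat
decreasing_by exact ndoorsLoop_meas h

def ndoors_alt (numero : Int) : List Int := ndoorsLoop numero 1 []

-- ===== PRECONDITION & SPEC =====
def Spec_ndoors (numero : Int) (out : List Int) : Prop := out = ndoors_alt numero
instance (numero : Int) (out : List Int) : Decidable (Spec_ndoors numero out) := by unfold Spec_ndoors; infer_instance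

-- ===== CLAIM (what is proved, stated in full; the proofs are below) =====
def Claim_equal_ndoors : Prop := ∀ (numero : Int), Dom_ndoors numero → Spec_ndoors numero (ndoors numero)

-- ===== LEMMAS AND PROOFS =====

-- divisor count of j among 1..M
def cnt (M j : Nat) : Nat := (List.range M).countP (fun m => (m + 1) ∣ j)

-- the boolean state of door k (0-based) after passes m = 1..M
def doorVal (M k : Nat) : Bool := cnt M (k + 1) % 2 == 1

-- (1) init loop builds replicate
theorem foldl_append_false (l : List Int) (acc : List Bool) :
    l.foldl (fun p _ => p ++ [false]) acc = acc ++ List.replicate l.length false := by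
  induction l generalizing acc with
  | nil => simp
  | cons x xs ih => simp [List.foldl_cons, ih, List.replicate_succ]

theorem foldl_toggle_aux (c : Nat → Bool) (p : List Bool) (M : Nat) (hM : M ≤ p.length) :
    (List.range M).foldl (fun q k => if c k then q.set k (!(q.getD k false)) else q) p
      = (p.take M).mapIdx (fun k b => if c k then !b else b) ++ p.drop M := by
  induction M with
  | zero => simp
  | succ M ih =>
    rw [List.range_succ, List.foldl_append, ih (by omega)]
    have hMlt : M < p.length := by omega
    have hA : ((p.take M).mapIdx (fun k b => if c k then !b else b)).length = M := by
      simp [List.length_mapIdx, List.length_take]; omega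
    set A := (p.take M).mapIdx (fun k b => if c k then !b else b) with hAdef
    have hdrop : p.drop M = p[M] :: p.drop (M + 1) := List.drop_eq_getElem_cons hMlt
    have hgetD : (A ++ p.drop M).getD M false = p[M] := by
      rw [hdrop, List.getD_eq_getElem?_getD, List.getElem?_append_right (by omega)]
      simp [hA, List.getElem?_eq_getElem hMlt]
    have hset : ∀ v, (A ++ p.drop M).set M v = A ++ v :: p.drop (M + 1) := by
      intro v
      rw [hdrop, List.set_append_right _ _ (by omega), hA, Nat.sub_self]
      rfl
    have htake : (p.take (M + 1)).mapIdx (fun k b => if c k then !b else b)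
        = A ++ [if c M then !p[M] else p[M]] := by
      rw [List.take_add_one, List.getElem?_eq_getElem hMlt]
      simp only [Option.toList_some, List.mapIdx_concat, List.length_take,
        Nat.min_eq_left (le_of_lt hMlt)]
      rw [← hAdef]
    simp only [List.foldl_cons, List.foldl_nil]
    by_cases hc : c M
    · rw [if_pos hc, hgetD, hset, htake, if_pos hc]
      simp
    · rw [if_neg hc, htake, if_neg hc]
      rw [hdrop]
      simp


theorem inner_pass (m : Int) (p : List Bool) :
    ((List.range p.length).map (fun k : Nat => (k : Int))).foldl (fun q k =>
        if PySem.Int.mod (k + 1) m == 0 then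
          (if PySem.List.pyGetD q k false == false then PySem.List.pySetD q k true
           else PySem.List.pySetD q k false)
        else q) p
      = p.mapIdx (fun k b => if PySem.Int.mod ((k : Int) + 1) m == 0 then !b else b) := by
  rw [List.foldl_map]
  have hfun : (fun (q : List Bool) (k : Nat) =>
      if PySem.Int.mod ((k : Int) + 1) m == 0 then
        (if PySem.List.pyGetD q (k : Int) false == false then PySem.List.pySetD q (k : Int) true
         else PySem.List.pySetD q (k : Int) false)
      else q)
      = (fun (q : List Bool) (k : Nat) => if (PySem.Int.mod ((k : Int) + 1) m == 0) then q.set k (!(q.getD k false)) else q) := by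
    funext q k
    by_cases hc : PySem.Int.mod ((k : Int) + 1) m == 0
    · rw [if_pos hc, if_pos hc]
      simp only [PySem.List.pyGetD_natCast, PySem.List.pySetD_natCast]
      cases hb : q.getD k false <;> simp [hb]
    · rw [if_neg hc, if_neg hc]
  rw [hfun, foldl_toggle_aux (fun k => PySem.Int.mod ((k : Int) + 1) m == 0) p p.length le_rfl]
  simp


theorem mapIdx_map_range {α β : Type} (N : Nat) (h : Nat → α) (f : Nat → α → β) :
    ((List.range N).map h).mapIdx f = (List.range N).map (fun k => f k (h k)) := by
  apply List.ext_getElem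
  · simp
  · intro i h1 h2
    simp [List.getElem_mapIdx]


theorem doorVal_step (M k : Nat) :
    (if PySem.Int.mod ((k : Int) + 1) (1 + (M : Int)) == 0 then !(doorVal M k) else doorVal M k)
      = doorVal (M + 1) k := by
  have hcast : (1 + (M : Int)) = ((M + 1 : Nat) : Int) := by push_cast; ring
  have hk : ((k : Int) + 1) = ((k + 1 : Nat) : Int) := by push_cast; ring
  have hdvd : (PySem.Int.mod ((k : Int) + 1) (1 + (M : Int)) == 0) = decide ((M + 1) ∣ (k + 1)) := by
    have h1 : PySem.Int.mod ((k : Int) + 1) (1 + (M : Int)) = 0 ↔ (M + 1) ∣ (k + 1) := by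
      rw [PySem.Int.mod_eq_zero_iff_dvd, hcast, hk, Int.natCast_dvd_natCast]
    by_cases h : (M + 1) ∣ (k + 1) <;> simp [h1, h]
  rw [hdvd]
  unfold doorVal cnt
  rw [List.range_succ, List.countP_append]
  by_cases h : (M + 1) ∣ (k + 1)
  · simp only [h, decide_true, if_true, List.countP_cons, List.countP_nil, decide_true]
    rcases Nat.mod_two_eq_zero_or_one ((List.range M).countP (fun m => (m + 1) ∣ (k + 1))) with h2 | h2 <;>
      simp [Nat.add_mod, h2]
  · simp [h]


theorem middle_phase (N : Nat) :
    (PySem.List.pyRange 1 ((N : Int) + 1) 1).foldl (fun p m =>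
        (PySem.List.pyRange 0 (N : Int) 1).foldl (fun q k =>
          if PySem.Int.mod (k + 1) m == 0 then
            (if PySem.List.pyGetD q k false == false then PySem.List.pySetD q k true
             else PySem.List.pySetD q k false)
          else q) p) (List.replicate N false)
      = (List.range N).map (fun k => doorVal N k) := by
  have hrange : PySem.List.pyRange 1 ((N : Int) + 1) 1
      = (List.range N).map (fun M : Nat => (1 : Int) + M) := by
    rw [PySem.List.pyRange_one]
    simp
  have hinner : PySem.List.pyRange 0 (N : Int) 1 = (List.range N).map (fun k : Nat => (k : Int)) := by
    rw [PySem.List.pyRange_one]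
    simp
  rw [hrange, hinner]
  suffices h : ∀ M : Nat,
      ((List.range M).map (fun M : Nat => (1 : Int) + M)).foldl (fun p m =>
        ((List.range N).map (fun k : Nat => (k : Int))).foldl (fun q k =>
          if PySem.Int.mod (k + 1) m == 0 then
            (if PySem.List.pyGetD q k false == false then PySem.List.pySetD q k true
             else PySem.List.pySetD q k false)
          else q) p) (List.replicate N false)
        = (List.range N).map (fun k => doorVal M k) by
    exact h N
  intro M
  induction M with
  | zero =>
    simp only [List.range_zero, List.map_nil, List.foldl_nil]
    apply List.ext_getElem
    · simp
    · intro i h1 h2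
      simp [doorVal, cnt]
  | succ M ih =>
    rw [List.range_succ, List.map_append, List.foldl_append, ih]
    simp only [List.map_cons, List.map_nil, List.foldl_cons, List.foldl_nil]
    have hlen : ((List.range N).map (fun k => doorVal M k)).length = N := by simp
    have heq := inner_pass (1 + (M : Int)) ((List.range N).map (fun k => doorVal M k))
    rw [hlen] at heq
    rw [heq, mapIdx_map_range]
    apply List.map_congr_left
    intro k _
    exact doorVal_step M k

theorem cnt_eq_card_divisors (M j : Nat) (hj : 0 < j) (hjM : j ≤ M) :
    cnt M j = j.divisors.card := by
  unfold cnt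
  have h1 : (List.range M).countP (fun m => (m + 1) ∣ j)
      = ((Finset.range M).filter (fun m => (m + 1) ∣ j)).card := by
    simp [Finset.filter, Finset.card, Finset.range, Multiset.range, Multiset.filter,
      List.countP_eq_length_filter]
  rw [h1]
  apply Finset.card_nbij' (i := fun m => m + 1) (j := fun d => d - 1)
  · intro m hm
    simp only [Finset.mem_coe, Finset.mem_filter, Finset.mem_range] at hm
    simp only [Finset.mem_coe, Nat.mem_divisors]
    exact ⟨hm.2, by omega⟩
  · intro d hd
    simp only [Finset.mem_coe, Nat.mem_divisors] at hd
    have hd1 : 1 ≤ d := Nat.one_le_iff_ne_zero.mpr (by rintro rfl; exact absurd (Nat.zero_dvd.mp hd.1) hj.ne')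
    have hdle : d ≤ j := Nat.le_of_dvd hj hd.1
    simp only [Finset.mem_coe, Finset.mem_filter, Finset.mem_range]
    constructor
    · omega
    · rw [Nat.sub_add_cancel hd1]; exact hd.1
  · intro m _
    show m + 1 - 1 = m
    omega
  · intro d hd
    simp only [Finset.mem_coe, Nat.mem_divisors] at hd
    have hd1 : 1 ≤ d := Nat.one_le_iff_ne_zero.mpr (by rintro rfl; exact absurd (Nat.zero_dvd.mp hd.1) hj.ne')
    show d - 1 + 1 = d
    omega


theorem odd_card_divisors_iff (j : Nat) (hj : 0 < j) :
    Odd j.divisors.card ↔ ∃ r : Nat, r * r = j := by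
  classical

  set L := j.divisors.filter (fun d => d * d < j) with hL
  set E := j.divisors.filter (fun d => d * d = j) with hE
  set U := j.divisors.filter (fun d => j < d * d) with hU
  have hsplit : j.divisors.card = L.card + E.card + U.card := by
    have h1 := Finset.filter_card_add_filter_neg_card_eq_card
      (s := j.divisors) (p := fun d => d * d < j)
    have hLeq : j.divisors.filter (fun d => d * d < j) = L := by
      rw [hL]
    rw [hLeq] at h1
    have h2 := Finset.filter_card_add_filter_neg_card_eq_card
      (s := j.divisors.filter (fun d => ¬ d * d < j)) (p := fun d => d * d = j)
    rw [Finset.filter_filter, Finset.filter_filter] at h2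
    have hEeq : j.divisors.filter (fun d => ¬ d * d < j ∧ d * d = j) = E := by
      apply Finset.ext
      intro d
      simp only [hE, Finset.mem_filter]
      constructor
      · rintro ⟨hdv, _, he⟩; exact ⟨hdv, he⟩
      · rintro ⟨hdv, he⟩; exact ⟨hdv, by omega, he⟩
    have hUeq : j.divisors.filter (fun d => ¬ d * d < j ∧ ¬ d * d = j) = U := by
      apply Finset.ext
      intro d
      simp only [hU, Finset.mem_filter]
      constructor
      · rintro ⟨hdv, h3, h4⟩; exact ⟨hdv, by omega⟩
      · rintro ⟨hdv, h3⟩; exact ⟨hdv, by omega, by omega⟩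
    have hEeq' : (j.divisors.filter (fun d => ¬ d * d < j ∧ d * d = j)).card = E.card := by
      rw [hEeq]
    have hUeq' : (j.divisors.filter (fun d => ¬ d * d < j ∧ ¬ d * d = j)).card = U.card := by
      rw [hUeq]
    omega
  have hLU : L.card = U.card := by
    apply Finset.card_nbij' (i := fun d => j / d) (j := fun d => j / d)
    · intro d hd
      simp only [hL, hU, Finset.mem_coe, Finset.mem_filter, Nat.mem_divisors] at hd ⊢
      obtain ⟨⟨hdvd, hj0⟩, hlt⟩ := hd
      have hd0 : 0 < d := Nat.pos_of_dvd_of_pos hdvd hj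
      have hdvd2 : j / d ∣ j := Nat.div_dvd_of_dvd hdvd
      obtain ⟨q, hq⟩ := hdvd
      have hqd : j / d = q := by rw [hq]; exact Nat.mul_div_cancel_left q hd0
      refine ⟨⟨hdvd2, hj0⟩, ?_⟩
      rw [hqd]
      have hdq : d < q := by
        by_contra hc
        push_neg at hc
        nlinarith [hq]
      nlinarith [hq]
    · intro d hd
      simp only [hL, hU, Finset.mem_coe, Finset.mem_filter, Nat.mem_divisors] at hd ⊢
      obtain ⟨⟨hdvd, hj0⟩, hlt⟩ := hd
      have hd0 : 0 < d := Nat.pos_of_dvd_of_pos hdvd hj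
      have hdvd2 : j / d ∣ j := Nat.div_dvd_of_dvd hdvd
      obtain ⟨q, hq⟩ := hdvd
      have hqd : j / d = q := by rw [hq]; exact Nat.mul_div_cancel_left q hd0
      refine ⟨⟨hdvd2, hj0⟩, ?_⟩
      rw [hqd]
      have hq0 : 0 < q := by nlinarith
      have hdq : q < d := by
        by_contra hc
        push_neg at hc
        nlinarith [hq]
      nlinarith
    · intro d hd
      simp only [hL, Finset.mem_coe, Finset.mem_filter, Nat.mem_divisors] at hd
      exact Nat.div_div_self hd.1.1 (by omega)
    · intro d hd
      simp only [hU, Finset.mem_coe, Finset.mem_filter, Nat.mem_divisors] at hd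
      exact Nat.div_div_self hd.1.1 (by omega)
  have hEcard : E.card = if ∃ r : Nat, r * r = j then 1 else 0 := by
    by_cases hsq : ∃ r : Nat, r * r = j
    · obtain ⟨r, hr⟩ := hsq
      have : E = {r} := by
        apply Finset.ext
        intro d
        simp only [hE, Finset.mem_filter, Nat.mem_divisors, Finset.mem_singleton]
        constructor
        · rintro ⟨_, hdd⟩
          nlinarith [hdd, hr]
        · intro hd
          rw [hd]
          exact ⟨⟨⟨r, hr.symm⟩, by omega⟩, hr⟩
      rw [this, if_pos ⟨r, hr⟩]
      simp
    · rw [if_neg hsq]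
      apply Finset.card_eq_zero.mpr
      apply Finset.eq_empty_of_forall_notMem
      intro d hd
      simp only [hE, Finset.mem_filter] at hd
      exact hsq ⟨d, hd.2⟩
  rw [hsplit, hLU, hEcard]
  by_cases hsq : ∃ r : Nat, r * r = j
  · simp only [if_pos hsq]
    constructor
    · intro _; exact hsq
    · intro _; exact ⟨U.card, by ring⟩
  · simp only [if_neg hsq]
    constructor
    · intro h
      obtain ⟨m, hm⟩ := h
      omega
    · intro h; exact absurd h hsq

-- (5) characterization of A
theorem doorVal_final (N k : Nat) (hk : k < N) :
    doorVal N k = (Nat.sqrt (k + 1) * Nat.sqrt (k + 1) == k + 1) := by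
  unfold doorVal
  rw [cnt_eq_card_divisors N (k + 1) (by omega) (by omega)]
  have h1 : Odd (k + 1).divisors.card ↔ Nat.sqrt (k + 1) * Nat.sqrt (k + 1) = k + 1 :=
    (odd_card_divisors_iff (k + 1) (by omega)).trans (Nat.exists_mul_self (k + 1))
  have h2 : ((k + 1).divisors.card % 2 = 1) ↔ Nat.sqrt (k + 1) * Nat.sqrt (k + 1) = k + 1 := by
    rw [← Nat.odd_iff]; exact h1
  by_cases h : Nat.sqrt (k + 1) * Nat.sqrt (k + 1) = k + 1
  · simp [h, h2.mpr h]
  · have hne : ¬ (k + 1).divisors.card % 2 = 1 := fun hc => h (h2.mp hc)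
    simp [h, hne]

theorem ndoors_eq (N : Nat) :
    ndoors (N : Int)
      = ((List.range N).filter (fun k => (Nat.sqrt (k+1) * Nat.sqrt (k+1) == k + 1))).map
          (fun k : Nat => ((k + 1 : Nat) : Int)) := by
  unfold ndoors
  have hinit : (PySem.List.pyRange 0 (N : Int) 1).foldl (fun p _ => p ++ [false]) ([] : List Bool)
      = List.replicate N false := by
    rw [foldl_append_false]
    simp [PySem.List.length_pyRange_one]
  simp only []
  rw [hinit, middle_phase, PySem.List.foldl_append_if]
  have hinner : PySem.List.pyRange 0 (N : Int) 1 = (List.range N).map (fun k : Nat => (k : Int)) := by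
    rw [PySem.List.pyRange_one]
    simp
  rw [hinner, List.filter_map, List.map_map]
  have hfil : (List.range N).filter
        ((fun k => PySem.List.pyGetD ((List.range N).map (fun k => doorVal N k)) k false == true)
          ∘ (fun k : Nat => (k : Int)))
      = (List.range N).filter (fun k => (Nat.sqrt (k+1) * Nat.sqrt (k+1) == k + 1)) := by
    apply List.filter_congr
    intro k hk
    have hkN : k < N := List.mem_range.mp hk
    simp only [Function.comp_apply, PySem.List.pyGetD_natCast]
    rw [List.getD_eq_getElem?_getD, List.getElem?_map, List.getElem?_range hkN]
    simp only [Option.map_some, Option.getD_some]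
    rw [← doorVal_final N k hkN]
    cases doorVal N k <;> simp
  rw [hfil]
  apply List.map_congr_left
  intro k _
  simp only [Function.comp_apply]
  push_cast
  ring

-- (6) squares list
theorem sqrt_succ_of_square (N : Nat) (h : Nat.sqrt (N + 1) * Nat.sqrt (N + 1) = N + 1) :
    Nat.sqrt (N + 1) = Nat.sqrt N + 1 := by
  have hr1 : 1 ≤ Nat.sqrt (N + 1) := by
    by_contra hc
    interval_cases h2 : Nat.sqrt (N + 1) <;> omega
  obtain ⟨s, hs⟩ : ∃ s, Nat.sqrt (N + 1) = s + 1 := ⟨Nat.sqrt (N + 1) - 1, by omega⟩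
  rw [hs] at h ⊢
  congr 1
  have hss : s * s ≤ N := by nlinarith
  have hlt : N < (s + 1) * (s + 1) := by omega
  have h1 : Nat.sqrt N < s + 1 := Nat.sqrt_lt.mpr hlt
  have h2 : s ≤ Nat.sqrt N := Nat.le_sqrt.mpr hss
  omega

theorem sqrt_succ_of_not_square (N : Nat) (h : ¬ Nat.sqrt (N + 1) * Nat.sqrt (N + 1) = N + 1) :
    Nat.sqrt (N + 1) = Nat.sqrt N := by
  apply le_antisymm
  · by_contra hc
    push_neg at hc
    have h1 : N < Nat.sqrt (N + 1) * Nat.sqrt (N + 1) := Nat.sqrt_lt.mp hc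
    have h2 : Nat.sqrt (N + 1) * Nat.sqrt (N + 1) ≤ N + 1 := Nat.sqrt_le (N + 1)
    omega
  · exact Nat.sqrt_le_sqrt (by omega)

theorem filter_squares (N : Nat) :
    ((List.range N).filter (fun k => (Nat.sqrt (k+1) * Nat.sqrt (k+1) == k + 1))).map
        (fun k : Nat => ((k + 1 : Nat) : Int))
      = (List.range (Nat.sqrt N)).map (fun t => (((t + 1) * (t + 1) : Nat) : Int)) := by
  induction N with
  | zero => simp
  | succ N ih =>
    rw [List.range_succ, List.filter_append, List.map_append, ih]
    by_cases hsq : Nat.sqrt (N + 1) * Nat.sqrt (N + 1) = N + 1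
    · have hs := sqrt_succ_of_square N hsq
      rw [hs, List.range_succ, List.map_append]
      congr 1
      have hpred : (Nat.sqrt (N + 1) * Nat.sqrt (N + 1) == N + 1) = true := by
        simp [hsq]
      simp only [List.filter_cons, List.filter_nil, hpred, if_true, List.map_cons, List.map_nil]
      have hval : (Nat.sqrt N + 1) * (Nat.sqrt N + 1) = N + 1 := by
        rw [← hs]; exact hsq
      rw [hval]
    · have hs := sqrt_succ_of_not_square N hsq
      rw [hs]
      have hpred : (Nat.sqrt (N + 1) * Nat.sqrt (N + 1) == N + 1) = false := by
        simp [hsq]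
      simp [List.filter_cons, hpred]

-- (7) characterization of B
theorem ndoorsLoop_eq (N : Nat) (j : Nat) (hj : 1 ≤ j) (acc : List Int) :
    ndoorsLoop (N : Int) (j : Int) acc
      = acc ++ (List.range' j (Nat.sqrt N + 1 - j)).map (fun t => ((t * t : Nat) : Int)) := by
  induction hm : Nat.sqrt N + 1 - j generalizing j acc with
  | zero =>
    have hgt : Nat.sqrt N < j := by omega
    have hNlt : N < j * j := Nat.sqrt_lt.mp hgt
    rw [ndoorsLoop]
    have hcond : ¬ ((j : Int) * (j : Int) ≤ (N : Int)) := by exact_mod_cast not_le.mpr hNlt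
    simp [hcond]
  | succ n ih =>
    have hle : j ≤ Nat.sqrt N := by omega
    have hjj : j * j ≤ N := Nat.le_sqrt.mp hle
    rw [ndoorsLoop]
    have hcond : ((j : Int) * (j : Int) ≤ (N : Int)) := by exact_mod_cast hjj
    rw [dif_pos hcond]
    have h1 : ((j : Int) + 1) = ((j + 1 : Nat) : Int) := by push_cast; ring
    have h2 : ((j : Int) * (j : Int)) = ((j * j : Nat) : Int) := by push_cast; ring
    rw [h1, h2, ih (j + 1) (by omega) _ (by omega)]
    rw [List.range'_succ, List.map_cons, List.append_assoc]
    rfl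

theorem ndoors_alt_eq (N : Nat) :
    ndoors_alt (N : Int)
      = (List.range (Nat.sqrt N)).map (fun t => (((t + 1) * (t + 1) : Nat) : Int)) := by
  unfold ndoors_alt
  rw [show (1 : Int) = ((1 : Nat) : Int) from rfl, ndoorsLoop_eq N 1 le_rfl]
  rw [List.range'_eq_map_range]
  simp [List.map_map, Nat.add_comm 1, Function.comp_def]

theorem ndoors_neg (numero : Int) (h : numero < 0) : ndoors numero = [] := by
  unfold ndoors
  rw [PySem.List.pyRange_one_eq_nil (by omega), PySem.List.pyRange_one_eq_nil (by omega)]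
  simp

theorem ndoors_alt_neg (numero : Int) (h : numero < 0) : ndoors_alt numero = [] := by
  unfold ndoors_alt ndoorsLoop
  rw [dif_neg (by omega)]

-- ===== VERDICT (by name: the statement is the Claim_ definition above) =====
theorem ndoors_spec : Claim_equal_ndoors := by
  intro numero _
  unfold Spec_ndoors
  by_cases h : 0 ≤ numero
  · obtain ⟨N, rfl⟩ := Int.eq_ofNat_of_zero_le h
    rw [ndoors_eq, filter_squares, ndoors_alt_eq]
  · rw [ndoors_neg numero (by omega), ndoors_alt_neg numero (by omega)]
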